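-- pv_equiv track=rewrite | github.com/eseckel/ai-for-grant-writing | mkindex.py | filter_gh_toc
-- ===== SOURCE A (Python) =====
-- def filter_gh_toc(lines):
--     """Filter the TOC for GitHub that should not be rendered in HTML."""
--     # TOC is the first listing before we hit any level 2 header (##)
--     ignore_lists = True
--     for ln in lines:
--         if ln.startswith("##"):  # level 2, 3, ... headers
--             ignore_lists = False
--         elif ln.lstrip().startswith("-"):  # is list
--             if ignore_lists:
--                 continue
--         yield ln
-- ===== SOURCE B (Python) =====
-- def filter_gh_toc(lines):
--     """Filter the TOC for GitHub that should not be rendered in HTML."""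
--     lines = list(lines)
--     boundary = len(lines)
--     for i, ln in enumerate(lines):
--         if ln.startswith("##"):
--             boundary = i
--             break
--     for ln in lines[:boundary]:
--         if not ln.lstrip().startswith("-"):
--             yield ln
--     for ln in lines[boundary:]:
--         yield ln
-- ===== Notes on version B (the rewrite author's own statement) =====
-- stated objective: simpler
-- what changed: B first computes the boundary (index of the first '##' line, defaulting to len), then emits lines before it filtered of list items and lines from it on unchanged, replacing A's stateful flag-carrying single pass.
import Mathlib
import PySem

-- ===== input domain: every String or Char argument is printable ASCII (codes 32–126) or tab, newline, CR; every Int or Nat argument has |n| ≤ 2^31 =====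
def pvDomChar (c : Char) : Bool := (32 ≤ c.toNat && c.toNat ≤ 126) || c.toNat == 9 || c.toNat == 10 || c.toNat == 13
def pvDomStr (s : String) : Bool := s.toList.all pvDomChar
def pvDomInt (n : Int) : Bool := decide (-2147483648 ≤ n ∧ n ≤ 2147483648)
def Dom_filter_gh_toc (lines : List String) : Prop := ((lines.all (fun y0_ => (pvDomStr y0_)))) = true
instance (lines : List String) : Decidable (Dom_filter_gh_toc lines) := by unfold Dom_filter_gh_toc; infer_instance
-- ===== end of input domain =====

-- B replaces A's stateful flag-carrying pass with boundary-then-two-passes; same output, no speed claim.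

-- ===== PORT A =====
-- single pass carrying the ignore_lists flag, appending yielded lines
def pvStepA (st : Bool × List String) (ln : String) : Bool × List String :=
  if PySem.Str.startswith ln "##" then (false, st.2 ++ [ln])
  else if PySem.Str.startswith (PySem.Str.lstrip ln) "-" then
    (if st.1 then st else (st.1, st.2 ++ [ln]))
  else (st.1, st.2 ++ [ln])

def filter_gh_toc (lines : List String) : List String :=
  (lines.foldl pvStepA (true, ([] : List String))).2

-- ===== PORT B =====
-- boundary = index of first '##' line (len if none); filter before it, pass through from it on
def filter_gh_toc_alt (lines : List String) : List String :=
  let boundary :=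
    match lines.findIdx? (fun ln => PySem.Str.startswith ln "##") with
    | some i => i
    | none => lines.length
  (lines.take boundary).filter
      (fun ln => !(PySem.Str.startswith (PySem.Str.lstrip ln) "-"))
    ++ lines.drop boundary

-- ===== PRECONDITION & SPEC =====
def Spec_filter_gh_toc (lines : List String) (out : List String) : Prop := out = filter_gh_toc_alt lines
instance (lines : List String) (out : List String) : Decidable (Spec_filter_gh_toc lines out) := by unfold Spec_filter_gh_toc; infer_instance

-- ===== CLAIM (what is proved, stated in full; the proofs are below) =====
def Claim_equal_filter_gh_toc : Prop := ∀ (lines : List String), Dom_filter_gh_toc lines → Spec_filter_gh_toc lines (filter_gh_toc lines)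

-- ===== LEMMAS AND PROOFS =====

-- recursive characterisation of A's loop body
def pvRecA (ig : Bool) : List String → List String
  | [] => []
  | ln :: ls =>
    if PySem.Str.startswith ln "##" then ln :: pvRecA false ls
    else if PySem.Str.startswith (PySem.Str.lstrip ln) "-" then
      (if ig then pvRecA ig ls else ln :: pvRecA ig ls)
    else ln :: pvRecA ig ls

theorem pvFoldA_eq (ls : List String) : ∀ (ig : Bool) (acc : List String),
    (ls.foldl pvStepA (ig, acc)).2 = acc ++ pvRecA ig ls := by
  induction ls with
  | nil => intro ig acc; simp [pvRecA]
  | cons ln ls ih =>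
    intro ig acc
    rw [List.foldl_cons]
    by_cases h1 : PySem.Chars.startswith ln.toList ['#', '#'] = true
    · have hs : pvStepA (ig, acc) ln = (false, acc ++ [ln]) := by simp [pvStepA, h1]
      have hr : pvRecA ig (ln :: ls) = ln :: pvRecA false ls := by simp [pvRecA, h1]
      rw [hs, ih, hr]; simp
    · by_cases h2 : PySem.Chars.startswith (PySem.Chars.lstrip ln.toList) ['-'] = true
      · cases ig
        · have hs : pvStepA (false, acc) ln = (false, acc ++ [ln]) := by
            simp [pvStepA, h1, h2]
          have hr : pvRecA false (ln :: ls) = ln :: pvRecA false ls := by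
            simp [pvRecA, h1, h2]
          rw [hs, ih, hr]; simp
        · have hs : pvStepA (true, acc) ln = (true, acc) := by simp [pvStepA, h1, h2]
          have hr : pvRecA true (ln :: ls) = pvRecA true ls := by simp [pvRecA, h1, h2]
          rw [hs, ih, hr]
      · have hs : pvStepA (ig, acc) ln = (ig, acc ++ [ln]) := by simp [pvStepA, h1, h2]
        have hr : pvRecA ig (ln :: ls) = ln :: pvRecA ig ls := by simp [pvRecA, h1, h2]
        rw [hs, ih, hr]; simp

theorem pvRecA_false (ls : List String) : pvRecA false ls = ls := by
  induction ls with
  | nil => rfl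
  | cons ln ls ih => simp only [pvRecA]; split_ifs <;> simp_all

theorem pvRecA_true_eq_alt (ls : List String) : pvRecA true ls = filter_gh_toc_alt ls := by
  induction ls with
  | nil => rfl
  | cons ln ls ih =>
    by_cases h1 : PySem.Chars.startswith ln.toList ['#', '#'] = true
    · simp [pvRecA, filter_gh_toc_alt, List.findIdx?_cons, h1, pvRecA_false]
    · by_cases h2 : PySem.Chars.startswith (PySem.Chars.lstrip ln.toList) ['-'] = true <;>
        cases hf : ls.findIdx? (fun l => PySem.Chars.startswith l.toList ['#', '#']) <;>
        simp [pvRecA, filter_gh_toc_alt, List.findIdx?_cons, h1, h2, ih, hf,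
          List.take_succ_cons, List.drop_succ_cons]

-- ===== VERDICT (by name: the statement is the Claim_ definition above) =====
theorem filter_gh_toc_spec : Claim_equal_filter_gh_toc := by
  intro lines _
  unfold Spec_filter_gh_toc filter_gh_toc
  rw [pvFoldA_eq, pvRecA_true_eq_alt]
  simp
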